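-- pv_equiv track=rewrite | github.com/MrBrantCode/unitest_baseline | mut_generate/mist_train_cf/cf_15103/solution.py | count_distinct_states
-- ===== SOURCE A (Python) =====
-- def count_distinct_states(matrix):
--     count = 0
--     states = set()
--     for row in matrix:
--         state = ''.join(row)
--         if state not in states:
--             count += 1
--         states.add(state)
--     return count
-- ===== SOURCE B (Python) =====
-- def count_distinct_states(matrix):
--     # sort-based dedup: count boundaries in the sorted key list
--     keys = sorted(''.join(row) for row in matrix)
--     count = 0
--     prev = None
--     for k in keys:
--         if k != prev:
--             count += 1
--         prev = k
--     return count
-- ===== Notes on version B (the rewrite author's own statement) =====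
-- stated objective: alternative
-- what changed: Replaced the hash-set membership loop by sort-then-scan: join each row, sort the keys, and count positions where the key differs from its predecessor.
import Mathlib
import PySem

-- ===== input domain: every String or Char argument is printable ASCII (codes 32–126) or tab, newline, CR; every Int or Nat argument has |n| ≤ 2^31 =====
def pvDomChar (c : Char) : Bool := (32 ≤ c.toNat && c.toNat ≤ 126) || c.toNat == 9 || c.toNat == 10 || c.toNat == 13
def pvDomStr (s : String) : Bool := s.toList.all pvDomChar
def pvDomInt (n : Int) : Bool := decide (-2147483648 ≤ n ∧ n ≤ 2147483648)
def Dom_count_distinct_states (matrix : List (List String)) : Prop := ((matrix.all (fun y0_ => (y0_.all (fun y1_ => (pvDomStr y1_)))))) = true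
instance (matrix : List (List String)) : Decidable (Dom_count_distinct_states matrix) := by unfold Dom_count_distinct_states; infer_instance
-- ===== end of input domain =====

-- B replaces A's hash-set membership loop by sort-then-scan over the joined row keys (alternative algorithm, same result).

-- ===== PORT A =====
def count_distinct_states (matrix : List (List String)) : Int :=
  (matrix.foldl (fun (st : Int × PySem.Set String) row =>
      let state := PySem.Str.join "" row
      ((if PySem.Set.contains st.2 state then st.1 else st.1 + 1), PySem.Set.add st.2 state))
    ((0 : Int), PySem.Set.empty)).1

-- ===== PORT B =====
def count_distinct_states_alt (matrix : List (List String)) : Int :=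
  let keys := PySem.List.sorted (matrix.map (fun row => PySem.Str.join "" row)) (fun x => x) false
  (keys.foldl (fun (st : Int × Option String) k =>
      ((if st.2 = some k then st.1 else st.1 + 1), some k))
    ((0 : Int), (none : Option String))).1

-- ===== PRECONDITION & SPEC =====
def Spec_count_distinct_states (matrix : List (List String)) (out : Int) : Prop := out = count_distinct_states_alt matrix
instance (matrix : List (List String)) (out : Int) : Decidable (Spec_count_distinct_states matrix out) := by unfold Spec_count_distinct_states; infer_instance

-- ===== CLAIM (what is proved, stated in full; the proofs are below) =====
def Claim_equal_count_distinct_states : Prop := ∀ (matrix : List (List String)), Dom_count_distinct_states matrix → Spec_count_distinct_states matrix (count_distinct_states matrix)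

-- ===== LEMMAS AND PROOFS =====

-- adjacency-difference count of B's scan, as a recursive function
def cntAux : Option String → List String → Int
  | _, [] => 0
  | prev, k :: t => (if prev = some k then 0 else 1) + cntAux (some k) t

theorem foldB_eq_cntAux (l : List String) (c : Int) (p : Option String) :
    (l.foldl (fun (st : Int × Option String) k =>
        ((if st.2 = some k then st.1 else st.1 + 1), some k)) (c, p)).1
      = c + cntAux p l := by
  induction l generalizing c p with
  | nil => simp [cntAux]
  | cons k t ih =>
    simp only [List.foldl_cons, cntAux]
    rw [ih]
    split_ifs <;> ring

theorem foldA_eq_update (rows : List (List String)) (c : Int) (s : PySem.Set String)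
    (hc : c = (s.length : Int)) :
    (rows.foldl (fun (st : Int × PySem.Set String) row =>
        let state := PySem.Str.join "" row
        ((if PySem.Set.contains st.2 state then st.1 else st.1 + 1), PySem.Set.add st.2 state))
      (c, s)).1
      = ((PySem.Set.update s (rows.map (fun row => PySem.Str.join "" row))).length : Int) := by
  induction rows generalizing c s with
  | nil => simpa [PySem.Set.update] using hc
  | cons r t ih =>
    simp only [List.foldl_cons]
    have hstep : PySem.Set.update s ((r :: t).map (fun row => PySem.Str.join "" row))
        = PySem.Set.update (PySem.Set.add s (PySem.Str.join "" r))
            (t.map (fun row => PySem.Str.join "" row)) := rfl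
    rw [hstep]
    apply ih
    by_cases h : PySem.Str.join "" r ∈ s
    · simp [PySem.Set.add, h, hc]
    · simp [PySem.Set.add, h, hc]

theorem ofList_length_eq_card (xs : List String) :
    (PySem.Set.ofList xs).length = xs.toFinset.card := by
  have hnd : (PySem.Set.ofList xs).Nodup := PySem.Set.nodup_ofList xs
  have hfs : (PySem.Set.ofList xs).toFinset = xs.toFinset := by
    ext x
    simp [PySem.Set.mem_ofList]
  rw [← List.toFinset_card_of_nodup hnd, hfs]

-- cntAux on a sorted list, with a previous element below everything still to come
theorem cntAux_sorted_some (l : List String) (hl : l.Pairwise (· ≤ ·)) (p : String)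
    (hp : ∀ x ∈ l, p ≤ x) :
    cntAux (some p) l = (l.toFinset.card : Int) - (if p ∈ l then 1 else 0) := by
  induction l generalizing p with
  | nil => simp [cntAux]
  | cons a t ih =>
    rcases List.pairwise_cons.mp hl with ⟨ha, ht⟩
    have hpa : p ≤ a := hp a (by simp)
    have hcard : ((a :: t).toFinset.card : Int)
        = (t.toFinset.card : Int) + (if a ∈ t then 0 else 1) := by
      by_cases h : a ∈ t
      · simp [List.toFinset_cons, Finset.insert_eq_self.mpr (List.mem_toFinset.mpr h), h]
      · simp [List.toFinset_cons,
          Finset.card_insert_of_notMem (fun hc => h (List.mem_toFinset.mp hc)), h]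
    by_cases hpeq : p = a
    · subst hpeq
      have := ih ht p (fun x hx => ha x hx)
      simp only [cntAux, if_pos rfl, zero_add, this, hcard]
      by_cases h : p ∈ t <;> simp [h] <;> push_cast <;> omega
    · have hpt : p ∉ t := fun hmem => hpeq (le_antisymm hpa (ha p hmem))
      have := ih ht a (fun x hx => ha x hx)
      simp only [cntAux, if_neg (fun h => hpeq (Option.some.inj h).symm), this, hcard]
      have hpl : p ∉ a :: t := by simp [hpeq, hpt]
      by_cases h : a ∈ t <;> simp [h, hpl, hpeq] <;> push_cast <;> omega

theorem cntAux_sorted_none (l : List String) (hl : l.Pairwise (· ≤ ·)) :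
    cntAux none l = (l.toFinset.card : Int) := by
  cases l with
  | nil => simp [cntAux]
  | cons a t =>
    rcases List.pairwise_cons.mp hl with ⟨ha, ht⟩
    have := cntAux_sorted_some t ht a ha
    simp only [cntAux, this]
    have hcard : ((a :: t).toFinset.card : Int)
        = (t.toFinset.card : Int) + (if a ∈ t then 0 else 1) := by
      by_cases h : a ∈ t
      · simp [List.toFinset_cons, Finset.insert_eq_self.mpr (List.mem_toFinset.mpr h), h]
      · simp [List.toFinset_cons,
          Finset.card_insert_of_notMem (fun hc => h (List.mem_toFinset.mp hc)), h]
    rw [hcard]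
    by_cases h : a ∈ t <;> simp [h] <;> push_cast <;> omega

-- ===== VERDICT (by name: the statement is the Claim_ definition above) =====
theorem count_distinct_states_spec : Claim_equal_count_distinct_states := by
  intro matrix _
  unfold Spec_count_distinct_states count_distinct_states count_distinct_states_alt
  set keys := matrix.map (fun row => PySem.Str.join "" row) with hkeys
  set skeys := PySem.List.sorted keys (fun x => x) false with hskeys
  have hA : (matrix.foldl (fun (st : Int × PySem.Set String) row =>
        let state := PySem.Str.join "" row
        ((if PySem.Set.contains st.2 state then st.1 else st.1 + 1), PySem.Set.add st.2 state))
      ((0 : Int), PySem.Set.empty)).1 = ((PySem.Set.ofList keys).length : Int) := by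
    simpa [PySem.Set.ofList_eq_foldl, PySem.Set.update, PySem.Set.empty] using
      foldA_eq_update matrix 0 PySem.Set.empty (by simp [PySem.Set.empty])
  have hpair : skeys.Pairwise (· ≤ ·) := by
    simpa using PySem.List.sorted_pairwise keys (fun x => x)
  have hperm : skeys.Perm keys := PySem.List.sorted_perm keys (fun x => x) false
  have hB : (skeys.foldl (fun (st : Int × Option String) k =>
        ((if st.2 = some k then st.1 else st.1 + 1), some k)) ((0 : Int), (none : Option String))).1
      = (keys.toFinset.card : Int) := by
    rw [foldB_eq_cntAux, cntAux_sorted_none skeys hpair, List.toFinset_eq_of_perm _ _ hperm]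
    ring
  rw [hA, hB, ofList_length_eq_card]
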